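-- pv_equiv track=rewrite | github.com/astraut-solutions/astraut-risk-reasoner-mvp | src/astraut_risk/framework_mapping.py | resolve_framework_selector
-- ===== SOURCE A (Python) =====
-- _FRAMEWORK_SPECS = {
--     "CIS": {
--         "display_name": "CIS Critical Security Controls",
--         "filename": "cis_controls.yaml",
--         "aliases": {"cis", "csc", "cis_controls"},
--     },
--     "NIST": {
--         "display_name": "NIST Cybersecurity Framework",
--         "filename": "nist_csf.yaml",
--         "aliases": {"nist", "nist_csf", "csf"},
--     },
--     "OWASP": {
--         "display_name": "OWASP Top 10",
--         "filename": "owasp_top10.yaml",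
--         "aliases": {"owasp", "owasp_top10"},
--     },
-- }
--
-- def resolve_framework_selector(selector: str) -> str | None:
--     """Resolve a framework selector like cis/nist/owasp to a canonical code."""
--     token = (selector or "").strip().lower()
--     if not token:
--         return None
--     for code, spec in _FRAMEWORK_SPECS.items():
--         if token == code.lower() or token in spec["aliases"]:
--             return code
--     return None
-- ===== SOURCE B (Python) =====
-- # B: single flat reverse-lookup table (alias -> canonical code) built once,
-- # replacing A's per-framework scan with one dict lookup.
--
-- _CANONICAL = {
--     "cis": "CIS", "csc": "CIS", "cis_controls": "CIS",
--     "nist": "NIST", "nist_csf": "NIST", "csf": "NIST",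
--     "owasp": "OWASP", "owasp_top10": "OWASP",
-- }
--
--
-- def resolve_framework_selector(selector: str) -> str | None:
--     token = (selector or "").strip().lower()
--     if not token:
--         return None
--     return _CANONICAL.get(token)
-- ===== Notes on version B (the rewrite author's own statement) =====
-- stated objective: idiomatic
-- what changed: Replaces the per-framework scan testing the lowercased code and each alias set with a single precomputed flat reverse-lookup dict from every alias to its canonical code, resolved by one .get.
import Mathlib
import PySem

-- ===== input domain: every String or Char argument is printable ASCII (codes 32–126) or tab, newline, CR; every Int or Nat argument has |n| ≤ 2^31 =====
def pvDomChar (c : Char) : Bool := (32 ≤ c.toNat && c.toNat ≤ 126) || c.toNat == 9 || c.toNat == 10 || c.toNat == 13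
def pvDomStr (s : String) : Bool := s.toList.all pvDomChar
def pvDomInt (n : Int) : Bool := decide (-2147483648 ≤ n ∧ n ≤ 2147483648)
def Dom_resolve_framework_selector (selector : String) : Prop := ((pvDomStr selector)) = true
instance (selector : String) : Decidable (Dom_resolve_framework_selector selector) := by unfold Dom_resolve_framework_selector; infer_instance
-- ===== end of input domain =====

-- B replaces A's per-framework scan with a single precomputed flat reverse-lookup table (idiomatic).

-- ===== PORT A =====
-- _FRAMEWORK_SPECS, restricted to the fields A reads (code and aliases)
def pvSpecs : List (String × PySem.Set String) :=
  [("CIS",   PySem.Set.ofList ["cis", "csc", "cis_controls"]),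
   ("NIST",  PySem.Set.ofList ["nist", "nist_csf", "csf"]),
   ("OWASP", PySem.Set.ofList ["owasp", "owasp_top10"])]

-- the 'for code, spec in _FRAMEWORK_SPECS.items()' loop
def pvFindA (token : String) : List (String × PySem.Set String) → Option String
  | [] => none
  | (code, aliases) :: rest =>
      if token == PySem.Str.lower code || PySem.Set.contains aliases token then some code
      else pvFindA token rest

def resolve_framework_selector (selector : String) : Option String :=
  let token := PySem.Str.lower (PySem.Str.strip selector)   -- (selector or "") is selector itself for str input
  if token == "" then none
  else pvFindA token pvSpecs

-- ===== PORT B =====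
-- _CANONICAL: flat reverse-lookup dict literal
def pvCanonical : PySem.Dict String String :=
  PySem.Dict.ofList
    [("cis", "CIS"), ("csc", "CIS"), ("cis_controls", "CIS"),
     ("nist", "NIST"), ("nist_csf", "NIST"), ("csf", "NIST"),
     ("owasp", "OWASP"), ("owasp_top10", "OWASP")]

def resolve_framework_selector_alt (selector : String) : Option String :=
  let token := PySem.Str.lower (PySem.Str.strip selector)
  if token == "" then none
  else pvCanonical.get? token

-- ===== PRECONDITION & SPEC =====
def Spec_resolve_framework_selector (selector : String) (out : Option String) : Prop := out = resolve_framework_selector_alt selector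
instance (selector : String) (out : Option String) : Decidable (Spec_resolve_framework_selector selector out) := by unfold Spec_resolve_framework_selector; infer_instance

-- ===== CLAIM (what is proved, stated in full; the proofs are below) =====
def Claim_equal_resolve_framework_selector : Prop := ∀ (selector : String), Dom_resolve_framework_selector selector → Spec_resolve_framework_selector selector (resolve_framework_selector selector)

-- ===== LEMMAS AND PROOFS =====

-- the scan over pvSpecs and the flat-table lookup agree on every token
theorem pvFindA_eq_get (tok : String) :
    pvFindA tok pvSpecs = pvCanonical.get? tok := by
  by_cases e1 : tok = "cis";          · subst e1; decide
  by_cases e2 : tok = "csc";          · subst e2; decide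
  by_cases e3 : tok = "cis_controls"; · subst e3; decide
  by_cases e4 : tok = "nist";         · subst e4; decide
  by_cases e5 : tok = "nist_csf";     · subst e5; decide
  by_cases e6 : tok = "csf";          · subst e6; decide
  by_cases e7 : tok = "owasp";        · subst e7; decide
  by_cases e8 : tok = "owasp_top10";  · subst e8; decide
  -- tok matches no alias and no lowercased code: both sides return none
  have hC : pvCanonical = PySem.Dict.mk
      [("cis", "CIS"), ("csc", "CIS"), ("cis_controls", "CIS"),
       ("nist", "NIST"), ("nist_csf", "NIST"), ("csf", "NIST"),
       ("owasp", "OWASP"), ("owasp_top10", "OWASP")] := by decide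
  have hS : pvSpecs =
      [("CIS",   ["cis", "csc", "cis_controls"]),
       ("NIST",  ["nist", "nist_csf", "csf"]),
       ("OWASP", ["owasp", "owasp_top10"])] := by decide
  have h1 : PySem.Str.lower "CIS" = "cis" := by decide
  have h2 : PySem.Str.lower "NIST" = "nist" := by decide
  have h3 : PySem.Str.lower "OWASP" = "owasp" := by decide
  rw [hC, hS]
  simp [pvFindA, h1, h2, h3, PySem.Set.contains,
    e1, e2, e3, e4, e5, e6, e7, e8, Ne.symm, PySem.Dict.get?]

-- ===== VERDICT (by name: the statement is the Claim_ definition above) =====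
theorem resolve_framework_selector_spec : Claim_equal_resolve_framework_selector := by
  intro selector _
  unfold Spec_resolve_framework_selector resolve_framework_selector resolve_framework_selector_alt
  simp only []
  by_cases h : PySem.Str.lower (PySem.Str.strip selector) == ""
  · simp [h]
  · simp [h, pvFindA_eq_get]
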